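-- pv_equiv track=rewrite | github.com/zenokoller/sequence | experiments/arrival/utils/common_subsequences.py | common_subsequences
-- ===== SOURCE A (Python) =====
-- from typing import Iterable, Tuple
--
-- def common_subsequences(first: Iterable[int],
--                         second: Iterable[int]) -> Iterable[Tuple[int, int]]:
--     """Given two lists `first` and `second`, yields bounds of matching subsequences."""
--     start = None
--     for i, (a, b) in enumerate(zip(first, second)):
--         if a == b and start is None:
--             start = i
--         elif a != b and start is not None:
--             yield (start, i)
--             start = None
--
--     if start is not None:
--         yield (start, min(len(first), len(second)))
--     return
-- ===== SOURCE B (Python) =====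
-- def common_subsequences(first, second):
--     """Given two lists `first` and `second`, yields bounds of matching subsequences."""
--     flags = [a == b for a, b in zip(first, second)]
--     n = len(flags)
--     i = 0
--     while i < n:
--         if not flags[i]:
--             i += 1
--             continue
--         j = i
--         while j < n and flags[j]:
--             j += 1
--         yield (i, j if j < n else min(len(first), len(second)))
--         i = j
-- ===== Notes on version B (the rewrite author's own statement) =====
-- stated objective: alternative
-- what changed: A is a fused one-pass state machine carrying an open-run Option start; B first precomputes the equality flags and then scans them run-by-run (inner loop consuming each maximal True run), yielding one bound per run.
import Mathlib
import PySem

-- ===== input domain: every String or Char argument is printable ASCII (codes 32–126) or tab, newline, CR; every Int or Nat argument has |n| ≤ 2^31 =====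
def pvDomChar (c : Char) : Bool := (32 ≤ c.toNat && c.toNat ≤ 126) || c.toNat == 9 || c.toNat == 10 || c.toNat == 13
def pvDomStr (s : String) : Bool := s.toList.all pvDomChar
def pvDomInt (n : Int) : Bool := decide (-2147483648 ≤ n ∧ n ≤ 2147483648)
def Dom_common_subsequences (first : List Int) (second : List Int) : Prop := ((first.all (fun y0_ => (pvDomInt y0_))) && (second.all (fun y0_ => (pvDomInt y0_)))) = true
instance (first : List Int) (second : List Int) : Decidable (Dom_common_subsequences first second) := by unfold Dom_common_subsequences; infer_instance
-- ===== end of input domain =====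

-- B replaces A's fused one-pass open-run state machine by a precompute-the-flags-then-scan-runs
-- decomposition (same cost, different structure); return value only — both are generators in Python.

-- ===== PORT A =====
-- A: one loop over enumerate(zip(first, second)) carrying (yielded, start : Option Int).
def common_subsequences (first : List Int) (second : List Int) : List (Int × Int) :=
  let st := (PySem.List.enumerate (List.zip first second) 0).foldl
    (fun (st : List (Int × Int) × Option Int) p =>
      let i := p.1
      let a := p.2.1
      let b := p.2.2
      if a = b ∧ st.2 = none then (st.1, some i)
      else if a ≠ b ∧ st.2 ≠ none then (st.1 ++ [(st.2.getD 0, i)], none)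
      else st) ([], none)
  match st.2 with
  | some s => st.1 ++ [(s, (min first.length second.length : Int))]
  | none => st.1

-- ===== PORT B =====
-- length of the leading run of `true` flags (B's inner `while j < n and flags[j]` scan)
def pvRunLen : List Bool → Nat
  | true :: fs => pvRunLen fs + 1
  | _ => 0

-- B's outer while loop: skip a false flag, or consume a whole true run and emit its bounds.
def pvRuns (flags : List Bool) (i : Int) (e : Int) : List (Int × Int) :=
  match flags with
  | [] => []
  | false :: fs => pvRuns fs (i + 1) e
  | true :: fs =>
      let k := pvRunLen (true :: fs)
      let rest := (true :: fs).drop k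
      (i, if rest.isEmpty then e else i + (k : Int)) :: pvRuns rest (i + (k : Int)) e
termination_by flags.length
decreasing_by
  · simp
  · have h : pvRunLen (true :: fs) = pvRunLen fs + 1 := rfl
    simp only [List.length_drop, List.length_cons]
    omega

def common_subsequences_alt (first : List Int) (second : List Int) : List (Int × Int) :=
  let flags := (List.zip first second).map (fun p => decide (p.1 = p.2))
  pvRuns flags 0 (min first.length second.length : Int)

-- ===== PRECONDITION & SPEC =====
def Spec_common_subsequences (first : List Int) (second : List Int) (out : List (Int × Int)) : Prop := out = common_subsequences_alt first second
instance (first : List Int) (second : List Int) (out : List (Int × Int)) : Decidable (Spec_common_subsequences first second out) := by unfold Spec_common_subsequences; infer_instance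

-- ===== CLAIM (what is proved, stated in full; the proofs are below) =====
def Claim_equal_common_subsequences : Prop := ∀ (first : List Int) (second : List Int), Dom_common_subsequences first second → Spec_common_subsequences first second (common_subsequences first second)

-- ===== LEMMAS AND PROOFS =====

-- A's loop, re-expressed on the flag list alone (proof-side model of port A)
def pvARun : List Bool → Int → Option Int → Int → List (Int × Int)
  | [], _, s, e => match s with | none => [] | some s0 => [(s0, e)]
  | f :: fs, i, s, e =>
    if f then
      match s with
      | none => pvARun fs (i + 1) (some i) e
      | some s0 => pvARun fs (i + 1) (some s0) e
    else
      match s with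
      | none => pvARun fs (i + 1) none e
      | some s0 => (s0, i) :: pvARun fs (i + 1) none e

theorem pv_drop_runLen (fs : List Bool) :
    fs.drop (pvRunLen fs) = [] ∨ ∃ tail, fs.drop (pvRunLen fs) = false :: tail := by
  induction fs with
  | nil => exact Or.inl rfl
  | cons f fs ih =>
    cases f
    · exact Or.inr ⟨fs, rfl⟩
    · have hk : pvRunLen (true :: fs) = pvRunLen fs + 1 := rfl
      rw [hk, List.drop_succ_cons]
      exact ih

theorem pvARun_some (fs : List Bool) (i s0 e : Int) :
    pvARun fs i (some s0) e =
      (match fs.drop (pvRunLen fs) with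
      | [] => [(s0, e)]
      | _ :: tail =>
          (s0, i + (pvRunLen fs : Int)) :: pvARun tail (i + (pvRunLen fs : Int) + 1) none e) := by
  induction fs generalizing i with
  | nil => simp [pvARun, pvRunLen]
  | cons f fs ih =>
    cases f
    · -- false head: run ends immediately, a bound is emitted here
      have hk : pvRunLen (false :: fs) = 0 := rfl
      simp [pvARun, hk]
    · -- true head: the run continues
      have hk : pvRunLen (true :: fs) = pvRunLen fs + 1 := rfl
      have hL : pvARun (true :: fs) i (some s0) e = pvARun fs (i + 1) (some s0) e := rfl
      rw [hL, ih]
      rw [hk, List.drop_succ_cons]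
      cases hdrop : fs.drop (pvRunLen fs) with
      | nil => rfl
      | cons h tail =>
        have h1 : i + 1 + (pvRunLen fs : Int) = i + ((pvRunLen fs + 1 : Nat) : Int) := by
          push_cast; ring
        simp only [h1]

theorem pvRuns_nil (i e : Int) : pvRuns [] i e = [] := by
  rw [pvRuns]

theorem pvRuns_false (fs : List Bool) (i e : Int) :
    pvRuns (false :: fs) i e = pvRuns fs (i + 1) e := by
  rw [pvRuns]

theorem pvRuns_true (fs : List Bool) (i e : Int) :
    pvRuns (true :: fs) i e =
      (i, if ((true :: fs).drop (pvRunLen (true :: fs))).isEmpty then e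
          else i + (pvRunLen (true :: fs) : Int)) ::
        pvRuns ((true :: fs).drop (pvRunLen (true :: fs)))
          (i + (pvRunLen (true :: fs) : Int)) e := by
  rw [pvRuns]

theorem pvARun_eq_pvRuns_aux (e : Int) : ∀ (n : Nat) (flags : List Bool),
    flags.length ≤ n → ∀ i, pvARun flags i none e = pvRuns flags i e := by
  intro n
  induction n with
  | zero =>
    intro flags hf i
    have h0 : flags = [] := List.eq_nil_of_length_eq_zero (Nat.le_zero.mp hf)
    subst h0
    simp [pvARun, pvRuns_nil]
  | succ n ihn =>
    intro flags hf i
    match flags with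
    | [] => simp [pvARun, pvRuns_nil]
    | false :: fs =>
      have hL : pvARun (false :: fs) i none e = pvARun fs (i + 1) none e := rfl
      have hlen : fs.length ≤ n := by simp at hf; omega
      rw [hL, ihn fs hlen, pvRuns_false]
    | true :: fs =>
      have hk : pvRunLen (true :: fs) = pvRunLen fs + 1 := rfl
      have hrest : (true :: fs).drop (pvRunLen (true :: fs)) = fs.drop (pvRunLen fs) := by
        rw [hk, List.drop_succ_cons]
      have hL : pvARun (true :: fs) i none e = pvARun fs (i + 1) (some i) e := rfl
      rw [hL, pvARun_some, pvRuns_true, hrest]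
      rcases pv_drop_runLen fs with hnil | ⟨tail, htail⟩
      · rw [hnil]
        simp [pvRuns_nil]
      · rw [htail]
        have hlen : tail.length ≤ n := by
          have h1 := congrArg List.length htail
          simp at h1 hf
          omega
        have ih2 : pvARun tail (i + (pvRunLen (true :: fs) : Int) + 1) none e
            = pvRuns tail (i + (pvRunLen (true :: fs) : Int) + 1) e :=
          ihn tail hlen _
        rw [pvRuns_false]
        simp only [List.isEmpty_cons, Bool.false_eq_true, if_false]
        rw [show i + 1 + (pvRunLen fs : Int) = i + (pvRunLen (true :: fs) : Int) from by
          rw [hk]; push_cast; ring]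
        rw [ih2]

theorem pvARun_eq_pvRuns (flags : List Bool) (i e : Int) :
    pvARun flags i none e = pvRuns flags i e :=
  pvARun_eq_pvRuns_aux e flags.length flags le_rfl i

theorem pvFold_eq (ps : List (Int × Int)) (n : Int) (acc : List (Int × Int)) (s : Option Int) (e : Int) :
    (let st := (PySem.List.enumerate ps n).foldl
      (fun (st : List (Int × Int) × Option Int) p =>
        let i := p.1
        let a := p.2.1
        let b := p.2.2
        if a = b ∧ st.2 = none then (st.1, some i)
        else if a ≠ b ∧ st.2 ≠ none then (st.1 ++ [(st.2.getD 0, i)], none)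
        else st) (acc, s)
     match st.2 with
     | some s0 => st.1 ++ [(s0, e)]
     | none => st.1) =
    acc ++ pvARun (ps.map (fun p => decide (p.1 = p.2))) n s e := by
  induction ps generalizing n acc s with
  | nil => cases s <;> simp [pvARun, PySem.List.enumerate]
  | cons p ps ih =>
    obtain ⟨a, b⟩ := p
    by_cases hab : a = b
    · cases s with
      | none =>
        simpa [PySem.List.enumerate_cons, pvARun, hab] using ih (n + 1) acc (some n)
      | some s0 =>
        simpa [PySem.List.enumerate_cons, pvARun, hab] using ih (n + 1) acc (some s0)
    · cases s with
      | none =>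
        simpa [PySem.List.enumerate_cons, pvARun, hab] using ih (n + 1) acc none
      | some s0 =>
        have := ih (n + 1) (acc ++ [(s0, n)]) none
        simpa [PySem.List.enumerate_cons, pvARun, hab, List.append_assoc] using this

theorem common_subsequences_eq_pvARun (first second : List Int) :
    common_subsequences first second =
      pvARun ((List.zip first second).map (fun p => decide (p.1 = p.2))) 0 none
        (min first.length second.length : Int) := by
  unfold common_subsequences
  exact pvFold_eq (List.zip first second) 0 [] none (min first.length second.length : Int)

-- ===== VERDICT (by name: the statement is the Claim_ definition above) =====
theorem common_subsequences_spec : Claim_equal_common_subsequences := by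
  intro first second _
  unfold Spec_common_subsequences common_subsequences_alt
  rw [common_subsequences_eq_pvARun, pvARun_eq_pvRuns]
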